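-- pv_equiv track=rewrite | github.com/sourcebots/srcomp-cli | sr/comp/cli/import_schedule.py | get_id_subsets
-- ===== SOURCE A (Python) =====
-- from typing import (
--     Dict,
--     Iterable,
--     Iterator,
--     List,
--     Mapping,
--     NamedTuple,
--     NewType,
--     Optional,
--     Tuple,
--     TypeVar,
-- )
--
-- T = TypeVar('T')
--
-- def get_id_subsets(ids: List[T], limit: int) -> Iterator[List[T]]:
--     num_ids = len(ids)
--
--     extra = num_ids - limit
--
--     if extra == 0:
--         # Only one posibility -- use all of them
--         yield ids
--
--     elif extra == 1:
--         for idx in range(len(ids)):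
--             ids_clone = ids[:]
--             ids_clone.pop(idx)
--             yield ids_clone
--
--     elif extra == 2:
--         for idx1 in range(len(ids)):
--             for idx2 in range(idx1 + 1, len(ids)):
--                 ids_clone = ids[:]
--                 ids_clone.pop(idx2)
--                 ids_clone.pop(idx1)
--                 yield ids_clone
--
--     elif extra == 3:
--         for idx1 in range(len(ids)):
--             for idx2 in range(idx1 + 1, len(ids)):
--                 for idx3 in range(idx2 + 1, len(ids)):
--                     ids_clone = ids[:]
--                     ids_clone.pop(idx3)
--                     ids_clone.pop(idx2)
--                     ids_clone.pop(idx1)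
--                     yield ids_clone
--
--     else:
--         # TODO: consider generalising the above or adding more handling
--         raise Exception("Too many empty slots to compensate for ({0}).".format(extra))
-- ===== SOURCE B (Python) =====
-- # Recursive keep/drop decomposition instead of four hardcoded loop nests.
-- # (Equivalence is about yielded VALUES: for extra == 0, A yields the same list
-- #  object while B yields a fresh copy.)
-- def _drop_k(xs, k):
--     # All lists obtained from xs by deleting exactly k elements, in
--     # lexicographic order of the deleted index sets.
--     if k == 0:
--         yield list(xs)
--         return
--     if len(xs) < k:
--         return
--     head = xs[0]
--     rest = xs[1:]
--     # delete the head (smallest removed index first) ...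
--     for r in _drop_k(rest, k - 1):
--         yield r
--     # ... or keep it and delete k elements further right
--     for r in _drop_k(rest, k):
--         yield [head] + r
--
-- def get_id_subsets(ids, limit):
--     extra = len(ids) - limit
--     if extra < 0 or extra > 3:
--         raise Exception("Too many empty slots to compensate for ({0}).".format(extra))
--     yield from _drop_k(ids, extra)
-- ===== Notes on version B (the rewrite author's own statement) =====
-- stated objective: simpler
-- what changed: The four hardcoded branch-specific loop nests (depth 0..3) are replaced by one recursive keep/drop generator _drop_k(xs, k) that yields all lists obtained by deleting exactly k elements, in the same lexicographic order of deleted index sets; get_id_subsets just validates extra and delegates.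
import Mathlib
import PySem

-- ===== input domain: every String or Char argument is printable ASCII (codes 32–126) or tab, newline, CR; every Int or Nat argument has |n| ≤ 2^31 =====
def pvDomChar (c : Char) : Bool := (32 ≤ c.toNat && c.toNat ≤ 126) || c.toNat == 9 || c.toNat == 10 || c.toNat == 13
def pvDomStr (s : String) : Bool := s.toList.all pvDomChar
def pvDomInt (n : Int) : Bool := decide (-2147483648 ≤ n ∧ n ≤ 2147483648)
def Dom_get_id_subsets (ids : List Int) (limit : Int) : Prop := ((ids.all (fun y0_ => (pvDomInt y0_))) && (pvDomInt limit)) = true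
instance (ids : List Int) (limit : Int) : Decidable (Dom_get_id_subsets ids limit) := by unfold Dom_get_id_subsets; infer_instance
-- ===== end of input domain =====

-- B replaces A's four hardcoded depth-0..3 loop nests by one recursive keep/drop
-- decomposition (simpler); return-value equivalence only (A's extra==0 branch yields
-- the argument list object itself, B a value-equal fresh list).


-- ===== PORT A =====
-- Literal transliteration of A; each 'yield' appends to the result list.
-- 'ids_clone.pop(idx)' is PySem.List.pop?; the 'none' (IndexError) arm is
-- unreachable since every index comes from range(len(...)).
def get_id_subsets (ids : List Int) (limit : Int) : List (List Int) :=
  let num_ids : Int := PySem.List.len ids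
  let extra : Int := num_ids - limit
  if extra = 0 then
    [ids]
  else if extra = 1 then
    (PySem.List.pyRange 0 (PySem.List.len ids) 1).foldl (fun out idx =>
      match PySem.List.pop? ids idx with
      | some (_, ids_clone) => out ++ [ids_clone]
      | none => out) []
  else if extra = 2 then
    (PySem.List.pyRange 0 (PySem.List.len ids) 1).foldl (fun out idx1 =>
      (PySem.List.pyRange (idx1 + 1) (PySem.List.len ids) 1).foldl (fun out idx2 =>
        match PySem.List.pop? ids idx2 with
        | some (_, c1) =>
          match PySem.List.pop? c1 idx1 with
          | some (_, c2) => out ++ [c2]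
          | none => out
        | none => out) out) []
  else if extra = 3 then
    (PySem.List.pyRange 0 (PySem.List.len ids) 1).foldl (fun out idx1 =>
      (PySem.List.pyRange (idx1 + 1) (PySem.List.len ids) 1).foldl (fun out idx2 =>
        (PySem.List.pyRange (idx2 + 1) (PySem.List.len ids) 1).foldl (fun out idx3 =>
          match PySem.List.pop? ids idx3 with
          | some (_, c1) =>
            match PySem.List.pop? c1 idx2 with
            | some (_, c2) =>
              match PySem.List.pop? c2 idx1 with
              | some (_, c3) => out ++ [c3]
              | none => out
            | none => out
          | none => out) out) out) []
  else
    []  -- Python raises Exception here; excluded by Pre_get_id_subsets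

-- ===== PORT B =====
-- _drop_k(xs, k): all lists obtained by deleting exactly k elements, in
-- lexicographic order of deleted index sets (k is the nonnegative 'extra').
def pvDropK : List Int → Nat → List (List Int)
  | xs, 0 => [xs]
  | xs, k + 1 =>
    if xs.length < k + 1 then []
    else
      match xs with
      | [] => []  -- unreachable: [] has length 0 < k+1
      | h :: rest => pvDropK rest k ++ (pvDropK rest (k + 1)).map (fun r => h :: r)
termination_by xs _ => xs.length

def get_id_subsets_alt (ids : List Int) (limit : Int) : List (List Int) :=
  let extra : Int := PySem.List.len ids - limit
  if extra < 0 ∨ 3 < extra then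
    []  -- Python raises Exception here; excluded by Pre_get_id_subsets
  else pvDropK ids extra.toNat

-- ===== PRECONDITION & SPEC =====
-- Pre_ excludes exactly the inputs where A raises: extra = len(ids) - limit outside 0..3.
def Pre_get_id_subsets (ids : List Int) (limit : Int) : Prop :=
  0 ≤ (ids.length : Int) - limit ∧ (ids.length : Int) - limit ≤ 3
instance (ids : List Int) (limit : Int) : Decidable (Pre_get_id_subsets ids limit) := by
  unfold Pre_get_id_subsets; infer_instance

def pvWitness_get_id_subsets : List Int × Int := ([1, 2, 3, 4], 2)

def Spec_get_id_subsets (ids : List Int) (limit : Int) (out : List (List Int)) : Prop := out = get_id_subsets_alt ids limit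
instance (ids : List Int) (limit : Int) (out : List (List Int)) : Decidable (Spec_get_id_subsets ids limit out) := by unfold Spec_get_id_subsets; infer_instance

-- ===== CLAIM (what is proved, stated in full; the proofs are below) =====
def Claim_equal_get_id_subsets : Prop := ∀ (ids : List Int) (limit : Int), Dom_get_id_subsets ids limit → Pre_get_id_subsets ids limit → Spec_get_id_subsets ids limit (get_id_subsets ids limit)

-- ===== LEMMAS AND PROOFS =====

-- pvDropK yields nothing when fewer than k elements remain
theorem pvDropK_eq_nil {xs : List Int} {k : Nat} (h : xs.length < k) : pvDropK xs k = [] := by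
  match k with
  | 0 => omega
  | k + 1 =>
    unfold pvDropK
    rw [if_pos h]

theorem pvDropK_cons (h : Int) (rest : List Int) (k : Nat) (hlen : ¬ rest.length < k) :
    pvDropK (h :: rest) (k + 1) = pvDropK rest k ++ (pvDropK rest (k + 1)).map (fun r => h :: r) := by
  conv_lhs => rw [pvDropK]
  rw [if_neg (by simpa using hlen)]

-- the one-step recurrence: first deleted index i, then k more deletions to the right
theorem pvDropK_succ (k : Nat) (xs : List Int) :
    pvDropK xs (k + 1) =
      (List.range xs.length).flatMap
        (fun i => (pvDropK (xs.drop (i + 1)) k).map (fun t => xs.take i ++ t)) := by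
  induction xs with
  | nil => simp [pvDropK]
  | cons h rest ih =>
    by_cases hlen : rest.length < k
    · rw [pvDropK_eq_nil (by simpa using Nat.succ_lt_succ hlen)]
      have hz : ∀ i ∈ List.range (h :: rest).length,
          (pvDropK ((h :: rest).drop (i + 1)) k).map (fun t => (h :: rest).take i ++ t) = [] := by
        intro i hi
        rw [pvDropK_eq_nil (by simp; omega)]
        simp
      rw [List.flatMap_congr hz]
      simp
    · rw [pvDropK_cons h rest k hlen]
      rw [List.length_cons, List.range_succ_eq_map]
      rw [List.flatMap_cons]
      simp only [List.drop_succ_cons, List.drop_zero, List.take_zero, List.nil_append,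
        List.flatMap_map]
      congr 1
      · simp
      · rw [ih]
        rw [List.map_flatMap]
        apply List.flatMap_congr
        intro i hi
        simp [List.map_map, Function.comp]

theorem take_eraseIdx_of_le (i k : Nat) (xs : List Int) (h : i ≤ k) :
    (xs.eraseIdx k).take i = xs.take i := by
  induction i generalizing xs k with
  | zero => simp
  | succ i ih =>
    match xs, k with
    | [], _ => simp
    | x :: t, 0 => omega
    | x :: t, k + 1 =>
      simp only [List.eraseIdx_cons_succ, List.take_succ_cons]
      rw [ih k t (by omega)]

theorem drop_eraseIdx_of_le (m k : Nat) (xs : List Int) (h : m ≤ k) :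
    (xs.eraseIdx k).drop m = (xs.drop m).eraseIdx (k - m) := by
  induction m generalizing xs k with
  | zero => simp
  | succ m ih =>
    match xs, k with
    | [], _ => simp
    | x :: t, 0 => omega
    | x :: t, k + 1 =>
      simp only [List.eraseIdx_cons_succ, List.drop_succ_cons]
      rw [ih k t (by omega)]
      congr 1
      omega

theorem eraseIdx_eraseIdx_of_lt (i j : Nat) (xs : List Int) (h : i < j) :
    (xs.eraseIdx j).eraseIdx i = xs.take i ++ (xs.drop (i + 1)).eraseIdx (j - i - 1) := by
  rw [List.eraseIdx_eq_take_drop_succ]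
  rw [take_eraseIdx_of_le i j xs (by omega)]
  rw [drop_eraseIdx_of_le (i + 1) j xs (by omega), Nat.sub_sub]


-- closed forms for pvDropK at k = 1, 2, 3
theorem pvDropK_one (xs : List Int) :
    pvDropK xs 1 = (List.range xs.length).map (fun i => xs.eraseIdx i) := by
  rw [pvDropK_succ 0 xs]
  simp only [pvDropK, List.map_cons, List.map_nil]
  rw [show (fun i => [List.take i xs ++ List.drop (i + 1) xs]) = (fun i => [xs.eraseIdx i]) from by
    funext i; rw [List.eraseIdx_eq_take_drop_succ]]
  exact (List.map_eq_flatMap).symm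

theorem pvDropK_two (xs : List Int) :
    pvDropK xs 2 =
      (List.range xs.length).flatMap (fun i =>
        (List.range (xs.length - i - 1)).map (fun d =>
          xs.take i ++ (xs.drop (i + 1)).eraseIdx d)) := by
  rw [pvDropK_succ 1 xs]
  apply List.flatMap_congr
  intro i hi
  rw [pvDropK_one, List.length_drop, List.map_map]
  have hn : xs.length - (i + 1) = xs.length - i - 1 := by omega
  rw [hn]
  rfl

theorem pvDropK_three (xs : List Int) :
    pvDropK xs 3 =
      (List.range xs.length).flatMap (fun i =>
        (List.range (xs.length - i - 1)).flatMap (fun d =>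
          (List.range (xs.length - i - 1 - d - 1)).map (fun e =>
            xs.take i ++ ((xs.drop (i + 1)).take d ++ ((xs.drop (i + 1)).drop (d + 1)).eraseIdx e)))) := by
  rw [pvDropK_succ 2 xs]
  apply List.flatMap_congr
  intro i hi
  rw [pvDropK_two, List.length_drop, List.map_flatMap]
  have hn : xs.length - (i + 1) = xs.length - i - 1 := by omega
  rw [hn]
  apply List.flatMap_congr
  intro d hd
  rw [List.map_map]
  simp [Function.comp]

-- A's extra == 1 loop, in closed form
theorem pvA1_eq (ids : List Int) :
    ((PySem.List.pyRange 0 (PySem.List.len ids) 1).foldl (fun out idx =>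
      match PySem.List.pop? ids idx with
      | some (_, ids_clone) => out ++ [ids_clone]
      | none => out) []) = (List.range ids.length).map (fun i => ids.eraseIdx i) := by
  rw [PySem.List.len_eq, PySem.List.pyRange_one, List.foldl_map]
  simp only [Int.sub_zero, Int.toNat_natCast, zero_add]
  refine Eq.trans (PySem.List.foldl_congr_mem
 (g := fun out i => out ++ [ids.eraseIdx i]) _ _ _ ?_) ?_
  · intro out i hi
    rw [PySem.List.pop?_natCast ids i (by simpa using hi)]
  · rw [PySem.List.foldl_append_singleton_eq_map, List.nil_append]

-- A's extra == 2 inner loop, for a fixed first index i < len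
theorem pvA2_inner_eq (ids : List Int) (i : Nat) (hi : i < ids.length) (out : List (List Int)) :
    ((PySem.List.pyRange ((i : Int) + 1) (PySem.List.len ids) 1).foldl (fun out idx2 =>
      match PySem.List.pop? ids idx2 with
      | some (_, c1) =>
        match PySem.List.pop? c1 (i : Int) with
        | some (_, c2) => out ++ [c2]
        | none => out
      | none => out) out)
    = out ++ (List.range (ids.length - i - 1)).map (fun d => (ids.eraseIdx (i + 1 + d)).eraseIdx i) := by
  rw [PySem.List.len_eq, PySem.List.pyRange_one, List.foldl_map]
  have hcnt : ((ids.length : Int) - ((i : Int) + 1)).toNat = ids.length - i - 1 := by omega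
  rw [hcnt]
  refine Eq.trans (PySem.List.foldl_congr_mem
      (g := fun out d => out ++ [(ids.eraseIdx (i + 1 + d)).eraseIdx i]) _ _ _ ?_) ?_
  · intro out d hd
    have hd' : d < ids.length - i - 1 := by simpa using hd
    have hidx : ((i : Int) + 1 + (d : Int)) = ((i + 1 + d : Nat) : Int) := by push_cast; ring
    rw [hidx, PySem.List.pop?_natCast ids (i + 1 + d) (by omega)]
    dsimp only
    have hlen : (ids.eraseIdx (i + 1 + d)).length = ids.length - 1 := by
      rw [List.length_eraseIdx_of_lt (by omega)]
    rw [PySem.List.pop?_natCast (ids.eraseIdx (i + 1 + d)) i (by omega)]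
  · rw [PySem.List.foldl_append_singleton_eq_map]

-- A's extra == 2 loop nest, in closed form
theorem pvA2_eq (ids : List Int) :
    ((PySem.List.pyRange 0 (PySem.List.len ids) 1).foldl (fun out idx1 =>
      (PySem.List.pyRange (idx1 + 1) (PySem.List.len ids) 1).foldl (fun out idx2 =>
        match PySem.List.pop? ids idx2 with
        | some (_, c1) =>
          match PySem.List.pop? c1 idx1 with
          | some (_, c2) => out ++ [c2]
          | none => out
        | none => out) out) [])
    = (List.range ids.length).flatMap (fun i =>
        (List.range (ids.length - i - 1)).map (fun d => (ids.eraseIdx (i + 1 + d)).eraseIdx i)) := by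
  conv_lhs => rw [PySem.List.len_eq, PySem.List.pyRange_one]
  rw [List.foldl_map]
  simp only [Int.sub_zero, Int.toNat_natCast, zero_add]
  refine Eq.trans (PySem.List.foldl_congr_mem
      (g := fun out i => out ++ (List.range (ids.length - i - 1)).map
        (fun d => (ids.eraseIdx (i + 1 + d)).eraseIdx i)) _ _ _ ?_) ?_
  · intro out i hi
    exact pvA2_inner_eq ids i (by simpa using hi) out
  · rw [PySem.List.foldl_append_eq_flatMap, List.nil_append]

-- A's extra == 3 innermost loop, for fixed i < j < len
theorem pvA3_inner_eq (ids : List Int) (i j : Nat) (hij : i < j) (hj : j < ids.length)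
    (out : List (List Int)) :
    ((PySem.List.pyRange ((j : Int) + 1) (PySem.List.len ids) 1).foldl (fun out idx3 =>
      match PySem.List.pop? ids idx3 with
      | some (_, c1) =>
        match PySem.List.pop? c1 (j : Int) with
        | some (_, c2) =>
          match PySem.List.pop? c2 (i : Int) with
          | some (_, c3) => out ++ [c3]
          | none => out
        | none => out
      | none => out) out)
    = out ++ (List.range (ids.length - j - 1)).map
        (fun e => ((ids.eraseIdx (j + 1 + e)).eraseIdx j).eraseIdx i) := by
  rw [PySem.List.len_eq, PySem.List.pyRange_one, List.foldl_map]
  have hcnt : ((ids.length : Int) - ((j : Int) + 1)).toNat = ids.length - j - 1 := by omega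
  rw [hcnt]
  refine Eq.trans (PySem.List.foldl_congr_mem
      (g := fun out e => out ++ [((ids.eraseIdx (j + 1 + e)).eraseIdx j).eraseIdx i]) _ _ _ ?_) ?_
  · intro out e he
    have he' : e < ids.length - j - 1 := by simpa using he
    have hidx : ((j : Int) + 1 + (e : Int)) = ((j + 1 + e : Nat) : Int) := by push_cast; ring
    rw [hidx, PySem.List.pop?_natCast ids (j + 1 + e) (by omega)]
    dsimp only
    have hlen1 : (ids.eraseIdx (j + 1 + e)).length = ids.length - 1 := by
      rw [List.length_eraseIdx_of_lt (by omega)]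
    rw [PySem.List.pop?_natCast (ids.eraseIdx (j + 1 + e)) j (by omega)]
    dsimp only
    have hlen2 : ((ids.eraseIdx (j + 1 + e)).eraseIdx j).length = ids.length - 2 := by
      rw [List.length_eraseIdx_of_lt (by omega), hlen1]
      omega
    rw [PySem.List.pop?_natCast ((ids.eraseIdx (j + 1 + e)).eraseIdx j) i (by omega)]
  · rw [PySem.List.foldl_append_singleton_eq_map]

-- A's extra == 3 middle loop, for a fixed first index i < len
theorem pvA3_mid_eq (ids : List Int) (i : Nat) (hi : i < ids.length) (out : List (List Int)) :
    ((PySem.List.pyRange ((i : Int) + 1) (PySem.List.len ids) 1).foldl (fun out idx2 =>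
      (PySem.List.pyRange (idx2 + 1) (PySem.List.len ids) 1).foldl (fun out idx3 =>
        match PySem.List.pop? ids idx3 with
        | some (_, c1) =>
          match PySem.List.pop? c1 idx2 with
          | some (_, c2) =>
            match PySem.List.pop? c2 (i : Int) with
            | some (_, c3) => out ++ [c3]
            | none => out
          | none => out
        | none => out) out) out)
    = out ++ (List.range (ids.length - i - 1)).flatMap (fun d =>
        (List.range (ids.length - (i + 1 + d) - 1)).map
          (fun e => ((ids.eraseIdx (i + 1 + d + 1 + e)).eraseIdx (i + 1 + d)).eraseIdx i)) := by
  rw [PySem.List.len_eq, PySem.List.pyRange_one, List.foldl_map]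
  have hcnt : ((ids.length : Int) - ((i : Int) + 1)).toNat = ids.length - i - 1 := by omega
  rw [hcnt]
  refine Eq.trans (PySem.List.foldl_congr_mem
      (g := fun out d => out ++ (List.range (ids.length - (i + 1 + d) - 1)).map
        (fun e => ((ids.eraseIdx (i + 1 + d + 1 + e)).eraseIdx (i + 1 + d)).eraseIdx i)) _ _ _ ?_) ?_
  · intro out d hd
    have hd' : d < ids.length - i - 1 := by simpa using hd
    have hidx : ((i : Int) + 1 + (d : Int)) = ((i + 1 + d : Nat) : Int) := by push_cast; ring
    rw [hidx]
    exact pvA3_inner_eq ids i (i + 1 + d) (by omega) (by omega) out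
  · rw [PySem.List.foldl_append_eq_flatMap]

-- A's extra == 3 loop nest, in closed form
theorem pvA3_eq (ids : List Int) :
    ((PySem.List.pyRange 0 (PySem.List.len ids) 1).foldl (fun out idx1 =>
      (PySem.List.pyRange (idx1 + 1) (PySem.List.len ids) 1).foldl (fun out idx2 =>
        (PySem.List.pyRange (idx2 + 1) (PySem.List.len ids) 1).foldl (fun out idx3 =>
          match PySem.List.pop? ids idx3 with
          | some (_, c1) =>
            match PySem.List.pop? c1 idx2 with
            | some (_, c2) =>
              match PySem.List.pop? c2 idx1 with
              | some (_, c3) => out ++ [c3]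
              | none => out
            | none => out
          | none => out) out) out) [])
    = (List.range ids.length).flatMap (fun i =>
        (List.range (ids.length - i - 1)).flatMap (fun d =>
          (List.range (ids.length - (i + 1 + d) - 1)).map
            (fun e => ((ids.eraseIdx (i + 1 + d + 1 + e)).eraseIdx (i + 1 + d)).eraseIdx i))) := by
  conv_lhs => rw [PySem.List.len_eq, PySem.List.pyRange_one]
  rw [List.foldl_map]
  simp only [Int.sub_zero, Int.toNat_natCast, zero_add]
  refine Eq.trans (PySem.List.foldl_congr_mem
      (g := fun out i => out ++ (List.range (ids.length - i - 1)).flatMap (fun d =>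
        (List.range (ids.length - (i + 1 + d) - 1)).map
          (fun e => ((ids.eraseIdx (i + 1 + d + 1 + e)).eraseIdx (i + 1 + d)).eraseIdx i))) _ _ _ ?_) ?_
  · intro out i hi
    exact pvA3_mid_eq ids i (by simpa using hi) out
  · rw [PySem.List.foldl_append_eq_flatMap, List.nil_append]

-- the three branch equalities
theorem pvCase2 (ids : List Int) :
    (List.range ids.length).flatMap (fun i =>
      (List.range (ids.length - i - 1)).map (fun d => (ids.eraseIdx (i + 1 + d)).eraseIdx i))
    = pvDropK ids 2 := by
  rw [pvDropK_two]
  apply List.flatMap_congr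
  intro i hi
  apply List.map_congr_left
  intro d hd
  rw [eraseIdx_eraseIdx_of_lt i (i + 1 + d) ids (by omega)]
  congr 1
  congr 1
  omega

theorem pvCase3 (ids : List Int) :
    (List.range ids.length).flatMap (fun i =>
      (List.range (ids.length - i - 1)).flatMap (fun d =>
        (List.range (ids.length - (i + 1 + d) - 1)).map
          (fun e => ((ids.eraseIdx (i + 1 + d + 1 + e)).eraseIdx (i + 1 + d)).eraseIdx i)))
    = pvDropK ids 3 := by
  rw [pvDropK_three]
  apply List.flatMap_congr
  intro i hi
  have hi' : i < ids.length := by simpa using hi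
  have hrng : ∀ d : Nat, ids.length - (i + 1 + d) - 1 = ids.length - i - 1 - d - 1 := by
    intro d; omega
  apply List.flatMap_congr
  intro d hd
  have hd' : d < ids.length - i - 1 := by simpa using hd
  rw [hrng d]
  apply List.map_congr_left
  intro e he
  have he' : e < ids.length - i - 1 - d - 1 := by simpa using he
  rw [eraseIdx_eraseIdx_of_lt i (i + 1 + d) (ids.eraseIdx (i + 1 + d + 1 + e)) (by omega)]
  rw [take_eraseIdx_of_le i (i + 1 + d + 1 + e) ids (by omega)]
  rw [drop_eraseIdx_of_le (i + 1) (i + 1 + d + 1 + e) ids (by omega)]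
  have h1 : i + 1 + d - i - 1 = d := by omega
  have h2 : i + 1 + d + 1 + e - (i + 1) = d + 1 + e := by omega
  rw [h1, h2]
  rw [eraseIdx_eraseIdx_of_lt d (d + 1 + e) (ids.drop (i + 1)) (by omega)]
  have h3 : d + 1 + e - d - 1 = e := by omega
  rw [h3]

-- ===== VERDICT (by name: the statement is the Claim_ definition above) =====
theorem get_id_subsets_spec : Claim_equal_get_id_subsets := by
  intro ids limit _ hpre
  obtain ⟨h0, h3⟩ := hpre
  unfold Spec_get_id_subsets
  have hcases : (ids.length : Int) - limit = 0 ∨ (ids.length : Int) - limit = 1 ∨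
      (ids.length : Int) - limit = 2 ∨ (ids.length : Int) - limit = 3 := by omega
  rcases hcases with hc | hc | hc | hc
  · have hev : PySem.List.len ids - limit = 0 := by rw [PySem.List.len_eq]; exact hc
    simp only [get_id_subsets, get_id_subsets_alt, hev, reduceIte, Int.reduceToNat]
    rw [if_neg (by norm_num)]
    simp [pvDropK]
  · have hev : PySem.List.len ids - limit = 1 := by rw [PySem.List.len_eq]; exact hc
    simp only [get_id_subsets, get_id_subsets_alt, hev, reduceIte, Int.reduceToNat]
    rw [if_neg (by norm_num)]
    exact (pvA1_eq ids).trans (pvDropK_one ids).symm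
  · have hev : PySem.List.len ids - limit = 2 := by rw [PySem.List.len_eq]; exact hc
    simp only [get_id_subsets, get_id_subsets_alt, hev, reduceIte, Int.reduceToNat]
    rw [if_neg (by norm_num)]
    exact (pvA2_eq ids).trans (pvCase2 ids)
  · have hev : PySem.List.len ids - limit = 3 := by rw [PySem.List.len_eq]; exact hc
    simp only [get_id_subsets, get_id_subsets_alt, hev, reduceIte, Int.reduceToNat]
    rw [if_neg (by norm_num)]
    exact (pvA3_eq ids).trans (pvCase3 ids)
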